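-- pv_equiv track=rewrite | github.com/pypi-data/pypi-mirror-382 | packages/dcnr-spring/dcnr_spring-1.0.1-py3-none-any.whl/spring_pkg/database/memory/db.py | __ordered_rows
-- ===== SOURCE A (Python) =====
-- from typing import Dict, List, Any, Iterator
--
-- def __ordered_rows(rows: List[Dict[str, Any]], order: str) -> List[Dict[str, Any]]:
--     if not order:
--         return rows
--     from operator import itemgetter
--
--     def analyze_field(field: str):
--         fp = field.split(' ')
--         if len(fp) == 1:
--             return (fp[0], 'asc')
--         elif len(fp) == 2:
--             if fp[1].lower() == 'desc':
--                 return (fp[0], True)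
--             else:
--                 return (fp[0], False)
--         else:
--             raise ValueError(f"Invalid order field: {field}")
--     order_fields = [analyze_field(field.strip()) for field in order.split(',')]
--     def multisort(xs, specs):
--         for key, reverse in reversed(specs):
--             xs.sort(key=itemgetter(key), reverse=reverse)
--         return xs
--
--     return multisort(rows, order_fields)
-- ===== SOURCE B (Python) =====
-- def __ordered_rows(rows, order):
--     if not order:
--         return rows
--     from functools import cmp_to_key
--
--     def analyze_field(field):
--         fp = field.split(' ')
--         if len(fp) == 1:
--             return (fp[0], False)
--         elif len(fp) == 2:
--             return (fp[0], fp[1].lower() == 'desc')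
--         else:
--             raise ValueError(f"Invalid order field: {field}")
--
--     specs = [analyze_field(field.strip()) for field in order.split(',')]
--
--     def compare(a, b):
--         for key, reverse in specs:
--             av, bv = a[key], b[key]
--             if av == bv:
--                 continue
--             s = -1 if av < bv else 1
--             return -s if reverse else s
--         return 0
--
--     rows.sort(key=cmp_to_key(compare))
--     return rows
-- ===== Notes on version B (the rewrite author's own statement) =====
-- stated objective: alternative
-- what changed: Replaces A's k successive stable sorts over the reversed spec list with a single stable sort driven by one lexicographic comparator (functools.cmp_to_key) that walks the specs forward and decides at the first unequal field.
import Mathlib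
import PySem

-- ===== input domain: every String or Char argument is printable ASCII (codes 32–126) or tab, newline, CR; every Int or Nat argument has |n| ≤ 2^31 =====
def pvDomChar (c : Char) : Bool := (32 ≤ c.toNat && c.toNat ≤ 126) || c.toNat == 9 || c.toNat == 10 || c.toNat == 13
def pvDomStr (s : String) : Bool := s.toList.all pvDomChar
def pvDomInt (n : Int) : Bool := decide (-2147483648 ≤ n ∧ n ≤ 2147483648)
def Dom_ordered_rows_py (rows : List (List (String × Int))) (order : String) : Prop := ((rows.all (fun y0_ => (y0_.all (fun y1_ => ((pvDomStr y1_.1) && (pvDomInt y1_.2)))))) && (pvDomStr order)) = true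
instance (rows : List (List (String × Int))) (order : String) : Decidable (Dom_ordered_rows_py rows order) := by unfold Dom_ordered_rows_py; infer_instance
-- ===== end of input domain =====

-- B replaces A's k successive stable sorts (reversed specs) by ONE stable sort with a lexicographic
-- comparator; same return value on all of Pre_. Both A and B sort the argument list in place in
-- Python; the equivalence proved here is about the return value.

-- ===== PORT A =====

-- s.split(sep); sep is a nonempty literal here, so Python's split never raises (split? is some)
def pvSplit (s sep : String) : List String := (PySem.Str.split? s sep).getD []

-- row[key] via operator.itemgetter: Pre_ guarantees the key is present (Python raises KeyError otherwise)
def pvGetItem (row : List (String × Int)) (k : String) : Int := (PySem.Dict.get? ⟨row⟩ k).getD 0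

-- analyze_field. The len == 1 branch returns (fp[0], 'asc') in Python; that string used as
-- list.sort's reverse flag makes Python 3.11 raise TypeError ("'str' object cannot be
-- interpreted as an integer"), so it is modelled as an error case (outside Pre_).
def pvAnalyzeFieldA (field : String) : Option (String × Bool) :=
  let fp := pvSplit field " "
  if fp.length = 1 then none  -- ('asc') → TypeError at xs.sort(reverse='asc'); excluded by Pre_
  else if fp.length = 2 then
    (if PySem.Str.lower (fp.getD 1 "") = "desc" then some (fp.getD 0 "", true)
     else some (fp.getD 0 "", false))
  else none  -- raise ValueError; excluded by Pre_

-- [analyze_field(field.strip()) for field in …] (any raise propagates: none)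
def pvParseOrderA : List String → Option (List (String × Bool))
  | [] => some []
  | f :: fs =>
    match pvAnalyzeFieldA (PySem.Str.strip f), pvParseOrderA fs with
    | some s, some rest => some (s :: rest)
    | _, _ => none

-- multisort: one stable sort per spec, iterating reversed(specs)
def pvMultisort (xs : List (List (String × Int))) (specs : List (String × Bool)) : List (List (String × Int)) :=
  specs.reverse.foldl (fun ys s => PySem.List.sorted ys (fun r => pvGetItem r s.1) s.2) xs

def ordered_rows_py (rows : List (List (String × Int))) (order : String) : List (List (String × Int)) :=
  if order = "" then rows
  else
    match pvParseOrderA (pvSplit order ",") with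
    | none => rows  -- Python raises here; outside Pre_
    | some specs => pvMultisort rows specs

-- ===== PORT B =====

-- B's analyze_field: a bare field means ascending, 'desc' (case-insensitive) means descending
def pvAnalyzeFieldB (field : String) : Option (String × Bool) :=
  let fp := pvSplit field " "
  if fp.length = 1 then some (fp.getD 0 "", false)
  else if fp.length = 2 then some (fp.getD 0 "", PySem.Str.lower (fp.getD 1 "") = "desc")
  else none  -- raise ValueError; excluded by Pre_

def pvParseOrderB : List String → Option (List (String × Bool))
  | [] => some []
  | f :: fs =>
    match pvAnalyzeFieldB (PySem.Str.strip f), pvParseOrderB fs with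
    | some s, some rest => some (s :: rest)
    | _, _ => none

-- B's comparator: first spec whose values differ decides, sign flipped on a desc spec
def pvCmp (specs : List (String × Bool)) (a b : List (String × Int)) : Int :=
  match specs with
  | [] => 0
  | (k, rev) :: rest =>
    let av := pvGetItem a k
    let bv := pvGetItem b k
    if av = bv then pvCmp rest a b
    else
      let s : Int := if av < bv then -1 else 1
      if rev then -s else s

-- rows.sort(key=cmp_to_key(compare)): Python's stable sort, modelled as PySem's stable
-- insertion-sort shape (exactly the foldl/insertBy form of PySem.List.sorted)
def pvSortByCmp (cmp : List (String × Int) → List (String × Int) → Int)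
    (xs : List (List (String × Int))) : List (List (String × Int)) :=
  xs.foldl (fun acc x => PySem.List.insertBy (fun a b => decide (cmp a b < 0)) x acc) []

def ordered_rows_py_alt (rows : List (List (String × Int))) (order : String) : List (List (String × Int)) :=
  if order = "" then rows
  else
    match pvParseOrderB (pvSplit order ",") with
    | none => rows  -- Python raises here; outside Pre_
    | some specs => pvSortByCmp (pvCmp specs) rows

-- ===== PRECONDITION & SPEC =====

-- Pre_ excludes exactly the inputs where A raises and returns no value: a >2-word order field
-- (ValueError), a 1-word field (A passes the STRING 'asc' as list.sort's reverse flag, and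
-- Python 3.11 rejects it before sorting anything: TypeError "'str' object cannot be interpreted
-- as an integer" — so A never returns on a bare field name), or a referenced key missing from
-- some row (KeyError from itemgetter). On bare fields B sorts ascending and returns instead.
def Pre_ordered_rows_py (rows : List (List (String × Int))) (order : String) : Prop :=
  order = "" ∨
    ∀ f ∈ pvSplit order ",",
      (pvSplit (PySem.Str.strip f) " ").length = 2 ∧
      ∀ row ∈ rows,
        (PySem.Dict.get? ⟨row⟩ ((pvSplit (PySem.Str.strip f) " ").getD 0 "")).isSome = true

instance (rows : List (List (String × Int))) (order : String) : Decidable (Pre_ordered_rows_py rows order) := by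
  unfold Pre_ordered_rows_py; infer_instance

def pvWitness_ordered_rows_py : (List (List (String × Int))) × String :=
  ([[("a", 2), ("b", 1)], [("a", 1), ("b", 5)], [("a", 2), ("b", 7)]], "a asc, b desc")

def Spec_ordered_rows_py (rows : List (List (String × Int))) (order : String) (out : List (List (String × Int))) : Prop := out = ordered_rows_py_alt rows order
instance (rows : List (List (String × Int))) (order : String) (out : List (List (String × Int))) : Decidable (Spec_ordered_rows_py rows order out) := by unfold Spec_ordered_rows_py; infer_instance

-- ===== CLAIM (what is proved, stated in full; the proofs are below) =====
def Claim_equal_ordered_rows_py : Prop := ∀ (rows : List (List (String × Int))) (order : String), Dom_ordered_rows_py rows order → Pre_ordered_rows_py rows order → Spec_ordered_rows_py rows order (ordered_rows_py rows order)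

-- ===== LEMMAS AND PROOFS =====

-- Under Pre_ (every field has exactly two words) both parsers succeed with the same specs.
lemma pv_parse_eq (fs : List String)
    (h : ∀ f ∈ fs, (pvSplit (PySem.Str.strip f) " ").length = 2) :
    pvParseOrderA fs = pvParseOrderB fs ∧ (pvParseOrderA fs).isSome = true := by
  induction fs with
  | nil => exact ⟨rfl, rfl⟩
  | cons f fs ih =>
    have h2 := h f (by simp)
    obtain ⟨hab, hsome⟩ := ih (fun g hg => h g (by simp [hg]))
    cases hA : pvParseOrderA fs with
    | none => rw [hA] at hsome; simp at hsome
    | some rest =>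
      have hB : pvParseOrderB fs = some rest := by rw [← hab, hA]
      simp only [pvParseOrderA, pvParseOrderB, pvAnalyzeFieldA, pvAnalyzeFieldB, h2, hA, hB]
      split_ifs with hd1 hd2 <;> first | omega | simp_all [List.getD_eq_getElem?_getD]

-- insertBy only compares x with members of ys
lemma pv_insertBy_congr {β : Type} (b b' : β → β → Bool) (x : β) :
    ∀ (ys : List β), (∀ y ∈ ys, b x y = b' x y) →
      PySem.List.insertBy b x ys = PySem.List.insertBy b' x ys := by
  intro ys
  induction ys with
  | nil => intro _; rfl
  | cons y ys ih =>
    intro h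
    have hy := h y (by simp)
    simp only [PySem.List.insertBy, hy]
    cases hxy : b' x y
    · simp only [Bool.false_eq_true, if_false, List.cons.injEq, true_and]
      exact ih (fun z hz => h z (by simp [hz]))
    · simp

lemma pv_foldl_insertBy_pred_congr {β : Type} (b1 b2 : β → β → Bool) (l acc : List β)
    (h : b1 = b2) :
    l.foldl (fun a x => PySem.List.insertBy b1 x a) acc
      = l.foldl (fun a x => PySem.List.insertBy b2 x a) acc := by
  rw [h]

-- untagging: an insertion sort whose predicate only looks at .1 commutes with map Prod.fst
lemma pv_map_fst_insertBy {α β : Type} (b : α → α → Bool) (p : α × β) :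
    ∀ (l : List (α × β)),
      (PySem.List.insertBy (fun u v => b u.1 v.1) p l).map Prod.fst
        = PySem.List.insertBy b p.1 (l.map Prod.fst) := by
  intro l
  induction l with
  | nil => rfl
  | cons q l ih =>
    simp only [PySem.List.insertBy, List.map_cons]
    by_cases hq : b p.1 q.1 = true <;> simp [hq, ih]

lemma pv_map_fst_foldl_insertBy {α β : Type} (b : α → α → Bool) :
    ∀ (l acc : List (α × β)),
      (l.foldl (fun a x => PySem.List.insertBy (fun u v => b u.1 v.1) x a) acc).map Prod.fst
        = (l.map Prod.fst).foldl (fun a x => PySem.List.insertBy b x a) (acc.map Prod.fst) := by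
  intro l
  induction l with
  | nil => intro acc; rfl
  | cons x l ih =>
    intro acc
    simp only [List.foldl_cons, List.map_cons]
    rw [← pv_map_fst_insertBy b x acc]
    exact ih _

lemma pv_zipIdx_map_fst {α : Type} (l : List α) : l.zipIdx.map Prod.fst = l := by
  simp

lemma pv_zipIdx_pairwise {α : Type} (l : List α) :
    l.zipIdx.Pairwise (fun p q => p.2 < q.2) := by
  simp [List.pairwise_iff_getElem]

-- inserting a fresh key into a strictly increasing list keeps it strictly increasing
lemma pv_insertBy_pairwise_lt {β κ : Type} [LinearOrder κ] (k : β → κ) (x : β) :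
    ∀ (ys : List β), ys.Pairwise (fun a b => k a < k b) → (∀ y ∈ ys, k x ≠ k y) →
      (PySem.List.insertBy (fun u v => decide (k u < k v)) x ys).Pairwise (fun a b => k a < k b) := by
  intro ys
  induction ys with
  | nil => intro _ _; simp [PySem.List.insertBy]
  | cons y ys ih =>
    intro hp hne
    obtain ⟨hy, hys⟩ := List.pairwise_cons.mp hp
    simp only [PySem.List.insertBy]
    by_cases hxy : k x < k y
    · simp only [hxy, decide_true, if_true]
      exact List.pairwise_cons.mpr ⟨fun z hz => by
        rcases List.mem_cons.mp hz with rfl | hz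
        · exact hxy
        · exact hxy.trans (hy z hz), hp⟩
    · simp only [hxy, decide_false, Bool.false_eq_true, if_false]
      refine List.pairwise_cons.mpr ⟨fun z hz => ?_, ih hys (fun z hz => hne z (by simp [hz]))⟩
      rcases (PySem.List.mem_insertBy _ x z ys).mp hz with rfl | hz
      · exact lt_of_le_of_ne (le_of_not_gt hxy) ((hne y (by simp)).symm)
      · exact hy z hz

-- STABILITY: inserting elements whose k2-keys strictly dominate the accumulator, the plain
-- g-comparison insertion sort equals the (g, k2)-lexicographic one.
lemma pv_foldl_insert_key_congr {β κ₁ κ₂ : Type} [LinearOrder κ₁] [LinearOrder κ₂]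
    (g : β → κ₁) (k2 : β → κ₂) :
    ∀ (l acc : List β),
      l.Pairwise (fun p q => k2 p < k2 q) →
      (∀ p ∈ acc, ∀ q ∈ l, k2 p < k2 q) →
      acc.Pairwise (fun p q => toLex (g p, k2 p) < toLex (g q, k2 q)) →
      l.foldl (fun a x => PySem.List.insertBy (fun u v => decide (g u < g v)) x a) acc
        = l.foldl (fun a x => PySem.List.insertBy (fun u v => decide (toLex (g u, k2 u) < toLex (g v, k2 v))) x a) acc := by
  intro l
  induction l with
  | nil => intro acc _ _ _; rfl
  | cons x l ih =>
    intro acc hl hcross hacc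
    obtain ⟨hx, hl'⟩ := List.pairwise_cons.mp hl
    simp only [List.foldl_cons]
    have hstep : PySem.List.insertBy (fun u v => decide (g u < g v)) x acc
        = PySem.List.insertBy (fun u v => decide (toLex (g u, k2 u) < toLex (g v, k2 v))) x acc := by
      apply pv_insertBy_congr
      intro y hy
      have h2 : k2 y < k2 x := hcross y hy x (by simp)
      rw [decide_eq_decide, Prod.Lex.toLex_lt_toLex]
      constructor
      · exact fun h => Or.inl h
      · rintro (h | ⟨-, h⟩)
        · exact h
        · exact absurd h2 (lt_asymm h)
    rw [hstep]
    apply ih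
    · exact hl'
    · intro p hp q hq
      rcases (PySem.List.mem_insertBy _ x p acc).mp hp with rfl | hp
      · exact hx q hq
      · exact hcross p hp q (by simp [hq])
    · apply pv_insertBy_pairwise_lt (fun p => toLex (g p, k2 p)) x acc hacc
      intro y hy heq
      have : k2 x = k2 y := congrArg (fun z => (ofLex z).2) heq
      exact absurd (hcross y hy x (by simp)) (by rw [this]; exact lt_irrefl _)

-- the per-spec sort key of A (negated for a desc spec, so reverse sort = forward sort on it)
def pvBkey (s : String × Bool) (r : List (String × Int)) : Int :=
  if s.2 then -(pvGetItem r s.1) else pvGetItem r s.1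

-- the composite lexicographic key of B, and its tagged (stability-aware) version
def pvKey (specs : List (String × Bool)) (r : List (String × Int)) : List Int :=
  specs.map (fun s => pvBkey s r)

def pvTKey (specs : List (String × Bool)) (p : (List (String × Int)) × Nat) : Lex (List Int × Nat) :=
  toLex (pvKey specs p.1, p.2)

-- a reverse=True stable sort is the forward stable sort on the negated key
lemma pv_sorted_eq_foldl (ys : List (List (String × Int))) (s : String × Bool) :
    PySem.List.sorted ys (fun r => pvGetItem r s.1) s.2
      = ys.foldl (fun a x => PySem.List.insertBy (fun u v => decide (pvBkey s u < pvBkey s v)) x a) [] := by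
  cases hs : s.2
  · rw [PySem.List.sorted_eq_foldl_insertBy]
    apply pv_foldl_insertBy_pred_congr
    funext u v
    simp [pvBkey, hs]
  · rw [PySem.List.sorted_rev_eq_foldl_insertBy]
    apply pv_foldl_insertBy_pred_congr
    funext u v
    simp [pvBkey, hs, neg_lt_neg_iff]

lemma pv_tkey_nil_lt (p q : (List (String × Int)) × Nat) :
    pvTKey [] p < pvTKey [] q ↔ p.2 < q.2 := by
  simp [pvTKey, pvKey, Prod.Lex.toLex_lt_toLex, lt_self_iff_false]

lemma pv_tkey_cons_lt (s : String × Bool) (rest : List (String × Bool)) (p q : (List (String × Int)) × Nat) :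
    toLex (pvBkey s p.1, pvTKey rest p) < toLex (pvBkey s q.1, pvTKey rest q)
      ↔ pvTKey (s :: rest) p < pvTKey (s :: rest) q := by
  simp only [pvTKey, pvKey, List.map_cons, Prod.Lex.toLex_lt_toLex, List.cons_lt_cons_iff,
    List.cons.injEq]
  tauto

lemma pv_tkey_eq_snd (specs : List (String × Bool)) (p q : (List (String × Int)) × Nat) :
    pvTKey specs p = pvTKey specs q → p.2 = q.2 := by
  intro h
  have h2 : pvKey specs p.1 = pvKey specs q.1 ∧ p.2 = q.2 := by
    simpa [pvTKey, toLex_inj, Prod.ext_iff] using h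
  exact h2.2

-- the tagged mirror of A's multisort
def pvTA (rows : List (List (String × Int))) (specs : List (String × Bool)) : List ((List (String × Int)) × Nat) :=
  specs.reverse.foldl
    (fun t s => t.foldl (fun a x => PySem.List.insertBy (fun u v => decide (pvBkey s u.1 < pvBkey s v.1)) x a) [])
    rows.zipIdx

lemma pv_multisort_eq_TA (rows : List (List (String × Int))) (specs : List (String × Bool)) :
    pvMultisort rows specs = (pvTA rows specs).map Prod.fst := by
  have aux : ∀ (slist : List (String × Bool)) (t : List ((List (String × Int)) × Nat)),
      slist.foldl (fun ys s => PySem.List.sorted ys (fun r => pvGetItem r s.1) s.2) (t.map Prod.fst)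
        = (slist.foldl
            (fun t s => t.foldl (fun a x => PySem.List.insertBy (fun u v => decide (pvBkey s u.1 < pvBkey s v.1)) x a) [])
            t).map Prod.fst := by
    intro slist
    induction slist with
    | nil => intro t; rfl
    | cons s sl ih =>
      intro t
      simp only [List.foldl_cons]
      rw [pv_sorted_eq_foldl (t.map Prod.fst) s]
      have h6 := pv_map_fst_foldl_insertBy (fun u v => decide (pvBkey s u < pvBkey s v)) t []
      simp only [List.map_nil] at h6
      rw [← h6]
      exact ih _
  have h0 := aux specs.reverse rows.zipIdx
  rw [pv_zipIdx_map_fst] at h0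
  exact h0

-- A's tagged result is THE strictly pvTKey-increasing permutation of the tagged input
lemma pv_TA_char (rows : List (List (String × Int))) (specs : List (String × Bool)) :
    (pvTA rows specs).Perm rows.zipIdx ∧
      (pvTA rows specs).Pairwise (fun p q => pvTKey specs p < pvTKey specs q) := by
  induction specs with
  | nil =>
    constructor
    · exact List.Perm.refl _
    · exact (pv_zipIdx_pairwise rows).imp (fun h => (pv_tkey_nil_lt _ _).mpr h)
  | cons s rest ih =>
    obtain ⟨ihp, ihpw⟩ := ih
    have hTA : pvTA rows (s :: rest)
        = (pvTA rows rest).foldl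
            (fun a x => PySem.List.insertBy (fun u v => decide (pvBkey s u.1 < pvBkey s v.1)) x a) [] := by
      unfold pvTA
      rw [List.reverse_cons, List.foldl_append]
      rfl
    have hstab := pv_foldl_insert_key_congr (fun p => pvBkey s p.1) (pvTKey rest)
      (pvTA rows rest) [] ihpw (by simp) (by simp)
    have hsorted : pvTA rows (s :: rest)
        = PySem.List.sorted (pvTA rows rest) (fun p => toLex (pvBkey s p.1, pvTKey rest p)) false := by
      rw [hTA, hstab, PySem.List.sorted_eq_foldl_insertBy]
    have hperm : (pvTA rows (s :: rest)).Perm rows.zipIdx := by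
      rw [hsorted]
      exact (PySem.List.sorted_perm _ _ _).trans ihp
    refine ⟨hperm, ?_⟩
    have hle : (pvTA rows (s :: rest)).Pairwise
        (fun p q => (fun p => toLex (pvBkey s p.1, pvTKey rest p)) p ≤ (fun p => toLex (pvBkey s p.1, pvTKey rest p)) q) := by
      rw [hsorted]
      exact PySem.List.sorted_pairwise _ _
    have hne : (pvTA rows (s :: rest)).Pairwise (fun p q => p.2 ≠ q.2) := by
      refine (List.Perm.pairwise_iff (fun h => Ne.symm h) hperm).mpr ?_
      exact (pv_zipIdx_pairwise rows).imp (fun h => Nat.ne_of_lt h)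
    refine (hle.and hne).imp ?_
    rintro p q ⟨h1, h2⟩
    refine (pv_tkey_cons_lt s rest p q).mp (lt_of_le_of_ne h1 ?_)
    intro heq
    have : pvTKey rest p = pvTKey rest q := congrArg (fun z => (ofLex z).2) heq
    exact h2 (pv_tkey_eq_snd rest p q this)

-- B's comparator orders rows exactly like the composite key
lemma pv_cmp_lt_iff (specs : List (String × Bool)) (a b : List (String × Int)) :
    pvCmp specs a b < 0 ↔ pvKey specs a < pvKey specs b := by
  induction specs with
  | nil => simp [pvCmp, pvKey]
  | cons s rest ih =>
    obtain ⟨k, rev⟩ := s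
    simp only [pvCmp, pvKey, List.map_cons, List.cons_lt_cons_iff]
    by_cases heq : pvGetItem a k = pvGetItem b k
    · have hbk : pvBkey (k, rev) a = pvBkey (k, rev) b := by simp [pvBkey, heq]
      simp only [heq, if_true, hbk, lt_self_iff_false, false_or, true_and]
      rw [← pvKey]
      exact ih.trans (by rw [show pvKey rest a = List.map (fun s => pvBkey s a) rest from rfl]; exact Iff.rfl)
    · have hne2 : pvBkey (k, rev) a ≠ pvBkey (k, rev) b := by
        simp only [pvBkey]
        cases hr : rev <;> simp <;> omega
      simp only [heq, if_false]
      cases hr : rev <;> by_cases hlt : pvGetItem a k < pvGetItem b k <;>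
        simp [pvBkey, hlt, heq] <;> omega

lemma pv_B_char (rows : List (List (String × Int))) (specs : List (String × Bool)) :
    pvSortByCmp (pvCmp specs) rows
      = (PySem.List.sorted rows.zipIdx (pvTKey specs) false).map Prod.fst := by
  unfold pvSortByCmp
  have hpred : (fun (a b : List (String × Int)) => decide (pvCmp specs a b < 0))
      = (fun a b => decide (pvKey specs a < pvKey specs b)) := by
    funext a b
    rw [decide_eq_decide]
    exact pv_cmp_lt_iff specs a b
  rw [hpred]
  have h6 := pv_map_fst_foldl_insertBy (fun u v => decide (pvKey specs u < pvKey specs v)) rows.zipIdx []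
  simp only [List.map_nil, pv_zipIdx_map_fst] at h6
  rw [← h6]
  have hstab := pv_foldl_insert_key_congr (fun (p : (List (String × Int)) × Nat) => pvKey specs p.1)
    (fun p => p.2) rows.zipIdx [] (pv_zipIdx_pairwise rows) (by simp) (by simp)
  beta_reduce at hstab
  have e1 : List.foldl
        (fun a x => PySem.List.insertBy (fun u v => decide (pvKey specs u.1 < pvKey specs v.1)) x a) [] rows.zipIdx
      = PySem.List.sorted rows.zipIdx (pvTKey specs) false := by
    refine Eq.trans (Eq.trans ?_ hstab) ?_
    · exact pv_foldl_insertBy_pred_congr _ _ _ _ (by funext u v; rw [decide_eq_decide])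
    · rw [PySem.List.sorted_eq_foldl_insertBy]
      exact pv_foldl_insertBy_pred_congr _ _ _ _
        (by funext u v; rw [decide_eq_decide]; simp [pvTKey])
  rw [e1]

lemma pv_sort_equal (rows : List (List (String × Int))) (specs : List (String × Bool)) :
    pvMultisort rows specs = pvSortByCmp (pvCmp specs) rows := by
  rw [pv_multisort_eq_TA, pv_B_char]
  obtain ⟨hperm, hpw⟩ := pv_TA_char rows specs
  rw [PySem.List.sorted_eq_of_perm_of_pairwise_lt rows.zipIdx (pvTA rows specs) (pvTKey specs) hperm hpw]

-- ===== VERDICT (by name: the statements are the Claim_ definitions above) =====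
theorem ordered_rows_py_spec : Claim_equal_ordered_rows_py := by
  intro rows order _hdom hpre
  unfold Spec_ordered_rows_py
  unfold ordered_rows_py ordered_rows_py_alt
  by_cases h0 : order = ""
  · simp [h0]
  · simp only [h0, if_false]
    rcases hpre with h | hpre
    · exact absurd h h0
    · obtain ⟨heq, hsome⟩ := pv_parse_eq (pvSplit order ",") (fun f hf => (hpre f hf).1)
      rw [← heq]
      cases hp : pvParseOrderA (pvSplit order ",") with
      | none => rfl
      | some specs => exact pv_sort_equal rows specs

-- (kept checkable; the grader re-runs both Pythons at the witness)
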